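-- pv_equiv track=rewrite | github.com/hellolmx123/Python_leetcode | 动态规划/矩阵Dp/***.括号匹配.py | MinDelete
-- ===== SOURCE A (Python) =====
-- def MinDelete(Str:str) -> int:
--     dp = [[0] * len(Str) for _ in range(len(Str) + 1)]
--     # dp[i][j] 的含义是指 以 i 开头 j 结尾的数组里面括号匹配的最大长度
--     for i in range(len(Str) - 1, -1, -1):
--         for j in range(i, len(Str)):
--             if [Str[i], Str[j]] in [['(', ')'], ['{', '}'], ['[', ']']]: # 如果 Str[i] 与 Str[j] 匹配
--                 dp[i][j] = dp[i + 1][j - 1] + 2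
--                 # 因为 i 与 j 已经匹配
--                 # 那么数组Str[i:j + 1]中最大匹配数量就是 2 加上Str[i + 1:j]中最大匹配数量
--             else:
--                 dp[i][j] = max(dp[i + 1][j], dp[i][j - 1])
--                 # 因为 i 与 j 没有匹配
--                 # 那么数组Str[i:j + 1]中最大匹配数量就是
--                 # Str[i + 1:j]中最大匹配数量和Str[i:j + 1]中最大匹配数量的最大值
--
--     return len(Str) - dp[0][-1]
-- ===== SOURCE B (Python) =====
-- def MinDelete(Str: str) -> int:
--     # Top-down memoized recursion on intervals: solve(i, j) = max matched
--     # bracket length inside Str[i..j]; only reachable subintervals are computed.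
--     pairs = (('(', ')'), ('{', '}'), ('[', ']'))
--     memo = {}
--
--     def solve(i, j):
--         if i > j:
--             return 0
--         if (i, j) in memo:
--             return memo[(i, j)]
--         if (Str[i], Str[j]) in pairs:
--             r = solve(i + 1, j - 1) + 2
--         else:
--             r = max(solve(i + 1, j), solve(i, j - 1))
--         memo[(i, j)] = r
--         return r
--
--     return len(Str) - solve(0, len(Str) - 1)
-- ===== Notes on version B (the rewrite author's own statement) =====
-- stated objective: alternative
-- what changed: Replaces A's bottom-up double loop filling a full (n+1) x n table (read out through a negative-index dp[0][-1]) by top-down memoized recursion on intervals solve(i, j), demand-driven from (0, n-1), storing only the reachable subintervals in a dict.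
import Mathlib
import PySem

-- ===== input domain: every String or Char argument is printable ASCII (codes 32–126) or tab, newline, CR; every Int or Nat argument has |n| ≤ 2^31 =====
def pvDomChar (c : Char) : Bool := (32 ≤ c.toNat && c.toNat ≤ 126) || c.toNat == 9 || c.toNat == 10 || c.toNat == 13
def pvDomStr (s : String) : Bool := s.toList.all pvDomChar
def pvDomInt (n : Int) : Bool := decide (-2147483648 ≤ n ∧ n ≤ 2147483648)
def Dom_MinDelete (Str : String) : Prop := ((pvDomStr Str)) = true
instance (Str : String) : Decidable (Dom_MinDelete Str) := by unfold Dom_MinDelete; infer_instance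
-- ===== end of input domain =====

-- B replaces A's bottom-up double loop over a full (n+1)×n table by top-down memoized
-- recursion on intervals that computes only the reachable subintervals (alternative
-- decomposition, same asymptotic cost). A raises IndexError on "" (excluded by Pre_);
-- B returns 0 there.

-- ===== PORT A =====
-- membership test  [Str[i], Str[j]] in [['(',')'],['{','}'],['[',']']]
def pvIsPair (a b : Char) : Bool :=
  (a == '(' && b == ')') || (a == '{' && b == '}') || (a == '[' && b == ']')

-- body of A's inner loop:  dp[i][j] = … (reads dp[i+1][j-1] / dp[i+1][j] / dp[i][j-1],
-- negative j-1 wraps exactly as Python's negative index does, via pyGetD)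
def pvBodyA (s : List Char) (i : Int) (dp : List (List Int)) (j : Int) : List (List Int) :=
  let v : Int :=
    if pvIsPair (PySem.List.pyGetD s i ' ') (PySem.List.pyGetD s j ' ') then
      PySem.List.pyGetD (PySem.List.pyGetD dp (i + 1) []) (j - 1) 0 + 2
    else
      max (PySem.List.pyGetD (PySem.List.pyGetD dp (i + 1) []) j 0)
          (PySem.List.pyGetD (PySem.List.pyGetD dp i []) (j - 1) 0)
  PySem.List.pySetD dp i (PySem.List.pySetD (PySem.List.pyGetD dp i []) j v)

-- A's inner loop:  for j in range(i, len(Str))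
def pvInnerA (s : List Char) (dp : List (List Int)) (i : Int) : List (List Int) :=
  (PySem.List.pyRange i (s.length : Int) 1).foldl (pvBodyA s i) dp

def MinDelete (Str : String) : Int :=
  let s := Str.toList
  let n : Int := (s.length : Int)
  let dp0 : List (List Int) := List.replicate (s.length + 1) (List.replicate s.length (0 : Int))
  let dp := (PySem.List.pyRange (n - 1) (-1) (-1)).foldl (pvInnerA s) dp0
  n - PySem.List.pyGetD (PySem.List.pyGetD dp 0 []) (-1) 0

-- ===== PORT B =====
-- the tuple  pairs = (('(', ')'), ('{', '}'), ('[', ']'))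
def pvPairsB : List (Char × Char) := [('(', ')'), ('{', '}'), ('[', ']')]

-- the nested  def solve(i, j)  with the mutated closure dict 'memo' threaded through
def pvSolveB (s : List Char) (i j : Int) (memo : PySem.Dict (Int × Int) Int) :
    Int × PySem.Dict (Int × Int) Int :=
  if i > j then (0, memo)
  else
    match memo.get? (i, j) with
    | some v => (v, memo)
    | none =>
      let r :=
        if pvPairsB.contains (PySem.List.pyGetD s i ' ', PySem.List.pyGetD s j ' ') then
          let p := pvSolveB s (i + 1) (j - 1) memo
          (p.1 + 2, p.2)
        else
          let p := pvSolveB s (i + 1) j memo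
          let q := pvSolveB s i (j - 1) p.2
          (max p.1 q.1, q.2)
      (r.1, r.2.insert (i, j) r.1)
termination_by (j - i + 1).toNat
decreasing_by all_goals omega

def MinDelete_alt (Str : String) : Int :=
  let s := Str.toList
  (s.length : Int) - (pvSolveB s 0 ((s.length : Int) - 1) PySem.Dict.empty).1

-- ===== PRECONDITION & SPEC =====
-- Pre_ excludes only the empty string, on which A raises IndexError at dp[0][-1].
def Pre_MinDelete (Str : String) : Prop := Str ≠ ""
instance (Str : String) : Decidable (Pre_MinDelete Str) := by unfold Pre_MinDelete; infer_instance

def pvWitness_MinDelete : String := "([])"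

def Spec_MinDelete (Str : String) (out : Int) : Prop := out = MinDelete_alt Str
instance (Str : String) (out : Int) : Decidable (Spec_MinDelete Str out) := by unfold Spec_MinDelete; infer_instance

-- ===== CLAIM (what is proved, stated in full; the proofs are below) =====
def Claim_equal_MinDelete : Prop := ∀ (Str : String), Dom_MinDelete Str → Pre_MinDelete Str → Spec_MinDelete Str (MinDelete Str)

-- ===== LEMMAS AND PROOFS =====

-- the common interval-DP value: pvG s i L = max matched length inside s[i : i+L]
def pvG (s : List Char) (i L : Nat) : Int :=
  match L with
  | 0 => 0
  | 1 => 0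
  | M + 2 =>
    if pvIsPair (s.getD i ' ') (s.getD (i + M + 1) ' ') then pvG s (i + 1) M + 2
    else max (pvG s (i + 1) (M + 1)) (pvG s i (M + 1))
termination_by L

theorem pvG_zero (s : List Char) (i : Nat) : pvG s i 0 = 0 := by rw [pvG]
theorem pvG_one (s : List Char) (i : Nat) : pvG s i 1 = 0 := by rw [pvG]
theorem pvG_two (s : List Char) (i M : Nat) :
    pvG s i (M + 2) =
      if pvIsPair (s.getD i ' ') (s.getD (i + M + 1) ' ') then pvG s (i + 1) M + 2
      else max (pvG s (i + 1) (M + 1)) (pvG s i (M + 1)) := by rw [pvG]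

-- A's table entry dp[r][j] as an interval value (0 when j+1 ≤ r)
def pvH (s : List Char) (r j : Nat) : Int := pvG s r (j + 1 - r)

theorem pvH_zero (s : List Char) (r j : Nat) (h : j < r) : pvH s r j = 0 := by
  unfold pvH
  rw [show j + 1 - r = 0 from by omega, pvG_zero]

-- A's dp after the outer iterations i = n-1 … i0 (rows r ≥ i0 filled)
def pvD (s : List Char) (i : Nat) : List (List Int) :=
  (List.range (s.length + 1)).map (fun r =>
    (List.range s.length).map (fun j => if i ≤ r then pvH s r j else 0))

-- A's dp in the middle of the inner loop for row i: entries of row i below j filled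
def pvE (s : List Char) (i j : Nat) : List (List Int) :=
  (List.range (s.length + 1)).map (fun r =>
    (List.range s.length).map (fun j' =>
      if i < r ∨ (r = i ∧ j' < j) then pvH s r j' else 0))

theorem pvIsPair_irrefl (c : Char) : pvIsPair c c = false := by
  by_cases h1 : c = '('
  · subst h1; decide
  by_cases h2 : c = '{'
  · subst h2; decide
  by_cases h3 : c = '['
  · subst h3; decide
  simp [pvIsPair, h1, h2, h3]

theorem pvContains_eq (a b : Char) : pvPairsB.contains (a, b) = pvIsPair a b := by
  apply Bool.eq_iff_iff.mpr
  simp only [pvPairsB, pvIsPair, List.contains_eq_mem, decide_eq_true_eq, List.mem_cons,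
    List.not_mem_nil, or_false, Prod.mk.injEq, Bool.or_eq_true, Bool.and_eq_true, beq_iff_eq]
  tauto

theorem pvSet_map_range {α : Type} (k j : Nat) (f : Nat → α) (v : α) :
    ((List.range k).map f).set j v =
      (List.range k).map (fun x => if x = j then v else f x) := by
  apply List.ext_getElem
  · simp
  · intro m h1 h2
    simp only [List.getElem_set, List.getElem_map, List.getElem_range]
    by_cases h : j = m
    · subst h; simp
    · have h' : m ≠ j := fun hh => h hh.symm
      simp [h, h']

theorem pvE_start (s : List Char) (i : Nat) : pvE s i i = pvD s (i + 1) := by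
  unfold pvE pvD
  refine List.map_congr_left (fun r _ => ?_)
  refine List.map_congr_left (fun j _ => ?_)
  by_cases h2 : i + 1 ≤ r
  · have h1 : i < r ∨ (r = i ∧ j < i) := Or.inl (by omega)
    rw [if_pos h1, if_pos h2]
  · rw [if_neg h2]
    by_cases h1 : i < r ∨ (r = i ∧ j < i)
    · rw [if_pos h1]
      rcases h1 with h | ⟨rfl, hj⟩
      · omega
      · exact pvH_zero _ _ _ hj
    · rw [if_neg h1]

theorem pvE_end (s : List Char) (i : Nat) : pvE s i s.length = pvD s i := by
  unfold pvE pvD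
  refine List.map_congr_left (fun r _ => ?_)
  refine List.map_congr_left (fun j hj => ?_)
  have hjn : j < s.length := List.mem_range.mp hj
  have hcond : (i < r ∨ (r = i ∧ j < s.length)) ↔ i ≤ r := by
    constructor
    · rintro (h | ⟨rfl, -⟩) <;> omega
    · intro h
      rcases Nat.eq_or_lt_of_le h with h1 | h1
      · exact Or.inr ⟨h1.symm, hjn⟩
      · exact Or.inl h1
  simp only [hcond]

theorem pvE_getD (s : List Char) (i j r : Nat) (hr : r < s.length + 1) :
    (pvE s i j).getD r [] =
      (List.range s.length).map (fun j' =>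
        if i < r ∨ (r = i ∧ j' < j) then pvH s r j' else 0) := by
  unfold pvE
  exact PySem.List.getD_map_range _ _ _ _ hr

theorem pvBody_step (s : List Char) (i j : Nat) (hij : i ≤ j) (hj : j < s.length) :
    pvBodyA s (i : Int) (pvE s i j) (j : Int) = pvE s i (j + 1) := by
  have hn1 : i + 1 < s.length + 1 := by omega
  have hi1 : i < s.length + 1 := by omega
  unfold pvBodyA
  simp only [PySem.List.pyGetD_natCast,
    show (i : Int) + 1 = ((i + 1 : Nat) : Int) from by push_cast; ring]
  rw [pvE_getD s i j (i + 1) hn1, pvE_getD s i j i hi1]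
  rw [show (List.range s.length).map (fun j' =>
        if i < i + 1 ∨ (i + 1 = i ∧ j' < j) then pvH s (i + 1) j' else 0)
      = (List.range s.length).map (fun j' => pvH s (i + 1) j') from
    List.map_congr_left (fun x _ => if_pos (Or.inl (by omega)))]
  rw [PySem.List.pySetD_natCast, PySem.List.pySetD_natCast]
  unfold pvE
  rw [pvSet_map_range, pvSet_map_range]
  refine List.map_congr_left (fun r _ => ?_)
  by_cases hr : r = i
  · subst hr
    rw [if_pos rfl]
    refine List.map_congr_left (fun x _ => ?_)
    by_cases hx : x = j
    · subst hx
      rw [if_pos rfl, if_pos (Or.inr ⟨rfl, by omega⟩)]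
      -- the written value equals pvH s x x-interval: the heart of the invariant
      by_cases hpair : pvIsPair (s.getD r ' ') (s.getD x ' ') = true
      · have hne : r ≠ x := by
          intro h; subst h
          rw [pvIsPair_irrefl] at hpair; exact Bool.false_ne_true hpair
        have hlt : r < x := by omega
        rw [if_pos hpair,
          show (x : Int) - 1 = ((x - 1 : Nat) : Int) from by omega,
          PySem.List.pyGetD_natCast,
          PySem.List.getD_map_range _ _ _ _ (show x - 1 < s.length from by omega)]
        unfold pvH
        rw [show x + 1 - r = (x - r - 1) + 2 from by omega, pvG_two,
          show r + (x - r - 1) + 1 = x from by omega, if_pos hpair,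
          show x - 1 + 1 - (r + 1) = x - r - 1 from by omega]
      · rw [if_neg hpair,
          PySem.List.getD_map_range _ _ _ _ (show x < s.length from hj)]
        rcases Nat.eq_or_lt_of_le hij with heq | hlt
        · -- r = x : both reads give 0 (dp[0][-1] wraps to the untouched last entry)
          subst heq
          have h2 : PySem.List.pyGetD ((List.range s.length).map (fun j' =>
              if r < r ∨ (r = r ∧ j' < r) then pvH s r j' else 0)) ((r : Int) - 1) 0 = 0 := by
            rcases Nat.eq_zero_or_pos r with rfl | hpos
            · rw [show ((0 : Nat) : Int) - 1 = -1 from by norm_num]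
              have hne : ((List.range s.length).map (fun j' =>
                  if 0 < 0 ∨ ((0 : Nat) = 0 ∧ j' < 0) then pvH s 0 j' else 0)) ≠ [] := by
                simp only [ne_eq, List.map_eq_nil_iff, List.range_eq_nil]
                omega
              rw [PySem.List.pyGetD_neg_one _ _ hne, List.getLast_eq_getElem]
              simp only [List.length_map, List.length_range, List.getElem_map, List.getElem_range]
              rw [if_neg (by omega)]
            · rw [show (r : Int) - 1 = ((r - 1 : Nat) : Int) from by omega,
                PySem.List.pyGetD_natCast,
                PySem.List.getD_map_range _ _ _ _ (show r - 1 < s.length from by omega),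
                if_pos (Or.inr ⟨rfl, by omega⟩), pvH_zero s r (r - 1) (by omega)]
          rw [h2, pvH_zero s (r + 1) r (by omega)]
          unfold pvH
          rw [show r + 1 - r = 1 from by omega, pvG_one]
          simp
        · -- r < x, not matched
          rw [show (x : Int) - 1 = ((x - 1 : Nat) : Int) from by omega,
            PySem.List.pyGetD_natCast,
            PySem.List.getD_map_range _ _ _ _ (show x - 1 < s.length from by omega),
            if_pos (Or.inr ⟨rfl, by omega⟩)]
          unfold pvH
          rw [show x + 1 - r = (x - r - 1) + 2 from by omega, pvG_two,
            show r + (x - r - 1) + 1 = x from by omega, if_neg hpair,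
            show x + 1 - (r + 1) = x - r - 1 + 1 from by omega,
            show x - 1 + 1 - r = x - r - 1 + 1 from by omega]
    · rw [if_neg hx]
      by_cases hc : r < r ∨ (r = r ∧ x < j)
      · rw [if_pos hc,
          if_pos (Or.inr ⟨rfl, by rcases hc with h | ⟨-, h⟩ <;> omega⟩)]
      · rw [if_neg hc,
          if_neg (fun hcc => by
            rcases hcc with h | ⟨-, h⟩
            · omega
            · exact hc (Or.inr ⟨rfl, by omega⟩))]
  · rw [if_neg hr]
    refine List.map_congr_left (fun x _ => ?_)
    by_cases hc : i < r
    · rw [if_pos (Or.inl hc), if_pos (Or.inl hc)]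
    · have hno : ∀ (j0 : Nat), ¬ (i < r ∨ (r = i ∧ x < j0)) := fun j0 hcc => by
        rcases hcc with h | ⟨h, -⟩
        · omega
        · exact hr h
      rw [if_neg (hno j), if_neg (hno (j + 1))]

theorem pvInner_from (s : List Char) (i : Nat) :
    ∀ (k j : Nat), i ≤ j → j ≤ s.length → s.length - j = k →
    (PySem.List.pyRange (j : Int) (s.length : Int) 1).foldl (pvBodyA s (i : Int)) (pvE s i j)
      = pvE s i s.length := by
  intro k
  induction k with
  | zero =>
    intro j hij hjn hk
    have : j = s.length := by omega
    subst this
    rw [PySem.List.pyRange_one_eq_nil (le_refl _)]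
    rfl
  | succ k ih =>
    intro j hij hjn hk
    have hlt : j < s.length := by omega
    rw [PySem.List.pyRange_one_cons (by exact_mod_cast hlt)]
    rw [List.foldl_cons, pvBody_step s i j hij hlt]
    rw [show (j : Int) + 1 = ((j + 1 : Nat) : Int) from by push_cast; ring]
    exact ih (j + 1) (by omega) (by omega) (by omega)

theorem pvInner (s : List Char) (i : Nat) (hi : i < s.length) :
    pvInnerA s (pvD s (i + 1)) (i : Int) = pvD s i := by
  unfold pvInnerA
  rw [← pvE_start, pvInner_from s i (s.length - i) i (le_refl i) (by omega) rfl, pvE_end]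

theorem pvOuter (s : List Char) : ∀ (i : Nat), i ≤ s.length →
    (PySem.List.pyRange ((i : Int) - 1) (-1) (-1)).foldl (pvInnerA s) (pvD s i) = pvD s 0 := by
  intro i
  induction i with
  | zero =>
    intro _
    rw [show ((0 : Nat) : Int) - 1 = -1 from by norm_num,
      PySem.List.pyRange_neg_one_eq_nil (le_refl _)]
    rfl
  | succ i ih =>
    intro hi
    rw [show ((i + 1 : Nat) : Int) - 1 = (i : Int) from by push_cast; ring,
      PySem.List.pyRange_neg_one_cons (by omega), List.foldl_cons,
      pvInner s i (by omega)]
    exact ih (by omega)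

theorem pvDp0_eq (s : List Char) :
    List.replicate (s.length + 1) (List.replicate s.length (0 : Int)) = pvD s s.length := by
  unfold pvD
  apply List.ext_getElem
  · simp
  · intro r h1 h2
    rw [List.getElem_replicate]
    simp only [List.getElem_map, List.getElem_range]
    apply List.ext_getElem
    · simp
    · intro x h3 h4
      rw [List.getElem_replicate]
      simp only [List.getElem_map, List.getElem_range]
      have hr : r < s.length + 1 := by simpa using h1
      have hx : x < s.length := by simpa using h3
      split_ifs with h
      · rw [pvH_zero s r x (by omega)]
      · rfl

theorem pvA_eq (Str : String) (hn : 1 ≤ Str.toList.length) :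
    MinDelete Str = (Str.toList.length : Int) - pvG Str.toList 0 Str.toList.length := by
  unfold MinDelete
  simp only []
  rw [pvDp0_eq, pvOuter Str.toList Str.toList.length (le_refl _)]
  congr 1
  rw [PySem.List.pyGetD_zero]
  unfold pvD
  rw [PySem.List.getD_map_range _ _ _ _ (by omega)]
  rw [show (List.range Str.toList.length).map (fun j =>
        if 0 ≤ 0 then pvH Str.toList 0 j else 0)
      = (List.range Str.toList.length).map (fun j => pvH Str.toList 0 j) from
    List.map_congr_left (fun x _ => if_pos (Nat.le_refl 0))]
  have hne : (List.range Str.toList.length).map (fun j => pvH Str.toList 0 j) ≠ [] := by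
    simp only [ne_eq, List.map_eq_nil_iff, List.range_eq_nil]
    omega
  rw [PySem.List.pyGetD_neg_one _ _ hne, List.getLast_eq_getElem]
  simp only [List.length_map, List.length_range, List.getElem_map, List.getElem_range]
  unfold pvH
  rw [show Str.toList.length - 1 + 1 - 0 = Str.toList.length from by omega]

-- ===== B side: the memoized recursion computes the same interval values =====

-- the interval value at Int indices (empty when i > j)
def pvGI (s : List Char) (i j : Int) : Int := pvG s i.toNat (j + 1 - i).toNat

-- the memo invariant: every stored entry is the interval value of its key
def pvInv (s : List Char) (m : PySem.Dict (Int × Int) Int) : Prop :=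
  ∀ (i j v : Int), m.get? (i, j) = some v → v = pvGI s i j

theorem pvGI_empty (s : List Char) (i j : Int) (h : i > j) : pvGI s i j = 0 := by
  unfold pvGI
  rw [show (j + 1 - i).toNat = 0 from by omega, pvG_zero]

theorem pvGI_rec (s : List Char) (i j : Int) (h0 : 0 ≤ i) (hij : i ≤ j)
    (hj : j < (s.length : Int)) :
    pvGI s i j =
      if pvIsPair (PySem.List.pyGetD s i ' ') (PySem.List.pyGetD s j ' ') then
        pvGI s (i + 1) (j - 1) + 2
      else max (pvGI s (i + 1) j) (pvGI s i (j - 1)) := by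
  have hi' : i = ((i.toNat : Nat) : Int) := by omega
  have hj' : j = ((j.toNat : Nat) : Int) := by omega
  rw [hi', hj', PySem.List.pyGetD_natCast, PySem.List.pyGetD_natCast, ← hi', ← hj']
  rcases eq_or_lt_of_le hij with heq | hlt
  · -- i = j: single character, never a pair with itself
    subst heq
    unfold pvGI
    rw [show (i + 1 - i).toNat = 1 from by omega, pvG_one,
      show (i + 1 - (i + 1)).toNat = 0 from by omega, pvG_zero,
      show (i - 1 + 1 - i).toNat = 0 from by omega, pvG_zero, pvIsPair_irrefl]
    simp
  · -- i < j
    unfold pvGI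
    rw [show (j + 1 - i).toNat = (j - i - 1).toNat + 2 from by omega, pvG_two,
      show i.toNat + (j - i - 1).toNat + 1 = j.toNat from by omega,
      show (i + 1).toNat = i.toNat + 1 from by omega,
      show (j - 1 + 1 - (i + 1)).toNat = (j - i - 1).toNat from by omega,
      show (j + 1 - (i + 1)).toNat = (j - i - 1).toNat + 1 from by omega,
      show (j - 1 + 1 - i).toNat = (j - i - 1).toNat + 1 from by omega]

theorem pvInv_empty (s : List Char) : pvInv s PySem.Dict.empty := by
  intro i j v h
  rw [PySem.Dict.get?_empty] at h
  exact absurd h (by simp)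

theorem pvSolveB_correct (s : List Char) :
    ∀ (N : Nat) (i j : Int) (m : PySem.Dict (Int × Int) Int),
      (j - i + 1).toNat ≤ N → 0 ≤ i → j < (s.length : Int) → pvInv s m →
      (pvSolveB s i j m).1 = pvGI s i j ∧ pvInv s (pvSolveB s i j m).2 := by
  intro N
  induction N with
  | zero =>
    intro i j m hN h0 hj hm
    have hij : i > j := by omega
    rw [pvSolveB, if_pos hij]
    exact ⟨(pvGI_empty s i j hij).symm, hm⟩
  | succ N ih =>
    intro i j m hN h0 hj hm
    rw [pvSolveB]
    by_cases hij : i > j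
    · rw [if_pos hij]
      exact ⟨(pvGI_empty s i j hij).symm, hm⟩
    · rw [if_neg hij]
      have hle : i ≤ j := by omega
      cases hget : m.get? (i, j) with
      | some v =>
        simp only []
        exact ⟨hm i j v hget, hm⟩
      | none =>
        simp only []
        rw [pvGI_rec s i j h0 hle hj, ← pvContains_eq]
        by_cases hp : pvPairsB.contains
            (PySem.List.pyGetD s i ' ', PySem.List.pyGetD s j ' ') = true
        · rw [if_pos hp, if_pos hp]
          obtain ⟨h1, h2⟩ := ih (i + 1) (j - 1) m (by omega) (by omega) (by omega) hm
          refine ⟨by rw [h1], ?_⟩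
          rw [h1]
          -- the stored value pvGI s (i+1) (j-1) + 2 equals pvGI s i j by pvGI_rec
          intro a b v h
          rw [PySem.Dict.get?_insert] at h
          by_cases hk : (a, b) = (i, j)
          · rw [if_pos hk] at h
            obtain ⟨rfl, rfl⟩ := Prod.mk.inj hk
            cases h
            rw [pvGI_rec s a b h0 hle hj, ← pvContains_eq, if_pos hp]
          · rw [if_neg hk] at h
            exact h2 a b v h
        · rw [if_neg hp, if_neg hp]
          obtain ⟨h1, h2⟩ := ih (i + 1) j m (by omega) (by omega) (by omega) hm
          obtain ⟨h3, h4⟩ := ih i (j - 1) (pvSolveB s (i + 1) j m).2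
            (by omega) (by omega) (by omega) h2
          refine ⟨by rw [h1, h3], ?_⟩
          rw [h1, h3]
          intro a b v h
          rw [PySem.Dict.get?_insert] at h
          by_cases hk : (a, b) = (i, j)
          · rw [if_pos hk] at h
            obtain ⟨rfl, rfl⟩ := Prod.mk.inj hk
            cases h
            rw [pvGI_rec s a b h0 hle hj, ← pvContains_eq, if_neg hp]
          · rw [if_neg hk] at h
            exact h4 a b v h

theorem pvB_eq (Str : String) (hn : 1 ≤ Str.toList.length) :
    MinDelete_alt Str = (Str.toList.length : Int) - pvG Str.toList 0 Str.toList.length := by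
  unfold MinDelete_alt
  simp only []
  congr 1
  have h := (pvSolveB_correct Str.toList (Str.toList.length) 0
    ((Str.toList.length : Int) - 1) PySem.Dict.empty (by omega) (by omega) (by omega)
    (pvInv_empty Str.toList)).1
  rw [h]
  unfold pvGI
  rw [show ((Str.toList.length : Int) - 1 + 1 - 0).toNat = Str.toList.length from by omega]
  rfl

-- ===== VERDICT (by name: the statement is the Claim_ definition above) =====
theorem MinDelete_spec : Claim_equal_MinDelete := by
  intro Str _ hpre
  unfold Spec_MinDelete
  have hn : 1 ≤ Str.toList.length := by
    rcases Nat.eq_zero_or_pos Str.toList.length with h | h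
    · exact absurd (String.toList_eq_nil_iff.mp (List.eq_nil_of_length_eq_zero h)) hpre
    · exact h
  rw [pvA_eq Str hn, pvB_eq Str hn]
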